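-- pv_equiv track=rewrite | github.com/wesley-ihene/toptown-ops | analytics/phase4_portal.py | _compatibility_mode_requested_from_query
-- ===== SOURCE A (Python) =====
-- COMPATIBILITY_QUERY_PARAM = "compat"
--
-- def _compatibility_mode_requested_from_query(query: str) -> bool:
--     for token in query.split("&"):
--         key, _, value = token.partition("=")
--         if key != COMPATIBILITY_QUERY_PARAM:
--             continue
--         if value.lower() in {"1", "true", "yes", "on"}:
--             return True
--     return False
-- ===== SOURCE B (Python) =====
-- import re
--
-- _COMPAT_RE = re.compile(r'(?:^|&)compat=([^&]*)')
--
-- def _compatibility_mode_requested_from_query(query: str) -> bool: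
--     return any(m.group(1).lower() in {"1", "true", "yes", "on"}
--                for m in _COMPAT_RE.finditer(query))
-- ===== Notes on version B (the rewrite author's own statement) =====
-- stated objective: idiomatic
-- what changed: Replaces the manual split-on-'&' loop with partition-per-token by a single anchored regex scan ((?:^|&)compat=([^&]*)) over the raw query, testing each captured value with any().
import Mathlib
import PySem

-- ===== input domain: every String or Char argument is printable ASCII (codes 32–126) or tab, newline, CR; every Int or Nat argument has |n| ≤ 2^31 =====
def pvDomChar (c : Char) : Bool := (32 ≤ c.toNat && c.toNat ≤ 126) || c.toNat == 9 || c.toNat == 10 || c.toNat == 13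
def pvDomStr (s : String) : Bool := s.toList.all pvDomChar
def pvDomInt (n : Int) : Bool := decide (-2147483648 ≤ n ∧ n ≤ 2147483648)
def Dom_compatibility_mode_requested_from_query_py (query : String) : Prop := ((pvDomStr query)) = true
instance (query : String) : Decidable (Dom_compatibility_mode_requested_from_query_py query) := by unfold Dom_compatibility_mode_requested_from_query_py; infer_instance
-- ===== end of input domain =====

-- B replaces A's split-on-'&'/partition loop by a single anchored regex scan of the raw query (idiomatic, same cost).


-- ===== PORT A =====
-- named character predicates (shared by the ports' split/partition/capture steps)
def pvNotAmp (c : Char) : Bool := c ≠ '&'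
def pvNotEqs (c : Char) : Bool := c ≠ '='

-- value.lower() in {"1", "true", "yes", "on"}  (the literal truthy-value set of the source)
def pvTruthy (value : List Char) : Bool :=
  let lv := PySem.Chars.lower value
  lv == "1".toList || lv == "true".toList || lv == "yes".toList || lv == "on".toList

-- A's for-loop with early return over the tokens of query.split("&");
-- token.partition("=") ported by hand (no PySem primitive): key = the part before the
-- first '=', value = the part after it ("" when there is no '='); exact.
def pvLoopA : List (List Char) → Bool
  | [] => false
  | tok :: toks =>
    let key := tok.takeWhile pvNotEqs
    let value := (tok.dropWhile pvNotEqs).drop 1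
    if key ≠ "compat".toList then pvLoopA toks
    else if pvTruthy value then true
    else pvLoopA toks

def compatibility_mode_requested_from_query_py (query : String) : Bool :=
  pvLoopA (PySem.Chars.splitOn query.toList "&".toList)

-- ===== PORT B =====
-- Hand port of any(... for m in re.finditer(r'(?:^|&)compat=([^&]*)', query)): a match
-- can start only at position 0 or at a '&' (the (?:^|&) anchor); at such a boundary it
-- requires the literal "compat=" and captures greedily up to the next '&'; scanning
-- resumes at the next '&'. Exact for this pattern.
def pvMatchB (cs : List Char) : Bool :=
  "compat=".toList.isPrefixOf cs && pvTruthy ((cs.drop 7).takeWhile pvNotAmp)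

def pvScanB (cs : List Char) : Bool :=
  if pvMatchB cs then true
  else if h : cs.dropWhile pvNotAmp = [] then false
  else pvScanB ((cs.dropWhile pvNotAmp).tail)
termination_by cs.length
decreasing_by
  have h1 : (cs.dropWhile pvNotAmp).length ≤ cs.length :=
    (List.dropWhile_suffix _).length_le
  have h2 : 0 < (cs.dropWhile pvNotAmp).length := List.length_pos_of_ne_nil h
  rw [List.length_tail]
  omega

def compatibility_mode_requested_from_query_py_alt (query : String) : Bool :=
  pvScanB query.toList

-- ===== PRECONDITION & SPEC =====
def Spec_compatibility_mode_requested_from_query_py (query : String) (out : Bool) : Prop := out = compatibility_mode_requested_from_query_py_alt query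
instance (query : String) (out : Bool) : Decidable (Spec_compatibility_mode_requested_from_query_py query out) := by unfold Spec_compatibility_mode_requested_from_query_py; infer_instance

-- ===== CLAIM (what is proved, stated in full; the proofs are below) =====
def Claim_equal_compatibility_mode_requested_from_query_py : Prop := ∀ (query : String), Dom_compatibility_mode_requested_from_query_py query → Spec_compatibility_mode_requested_from_query_py query (compatibility_mode_requested_from_query_py query)

-- ===== LEMMAS AND PROOFS =====

-- reference splitter on '&', structurally recursive
def pvSpl (cs : List Char) : List (List Char) :=
  cs.takeWhile pvNotAmp ::
    (if h : cs.dropWhile pvNotAmp = [] then []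
     else pvSpl ((cs.dropWhile pvNotAmp).tail))
termination_by cs.length
decreasing_by
  have h1 : (cs.dropWhile pvNotAmp).length ≤ cs.length :=
    (List.dropWhile_suffix _).length_le
  have h2 : 0 < (cs.dropWhile pvNotAmp).length := List.length_pos_of_ne_nil h
  rw [List.length_tail]
  omega

-- splitOn.go with sep = "&" computes the reference splitter
lemma pvGo_eq (fuel : Nat) :
    ∀ (l cur : List Char) (acc : List (List Char)), l.length < fuel →
      PySem.Chars.splitOn.go "&".toList fuel l cur acc =
        acc.reverse ++ ((cur.reverse ++ l.takeWhile pvNotAmp) ::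
          (if _h : l.dropWhile pvNotAmp = [] then []
           else pvSpl ((l.dropWhile pvNotAmp).tail))) := by
  induction fuel with
  | zero => intro l cur acc h; omega
  | succ n ih =>
    intro l cur acc h
    match l with
    | [] => simp [PySem.Chars.splitOn.go, List.takeWhile_nil, List.dropWhile_nil]
    | c :: rest =>
      by_cases hc : c = '&'
      · subst hc
        have hpre : "&".toList.isPrefixOf ('&' :: rest) = true := rfl
        have hstep : PySem.Chars.splitOn.go "&".toList (n + 1) ('&' :: rest) cur acc =
            PySem.Chars.splitOn.go "&".toList n rest [] (cur.reverse :: acc) := by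
          simp [PySem.Chars.splitOn.go, hpre]
        have h1 : List.takeWhile pvNotAmp ('&' :: rest) = [] := by
          simp [List.takeWhile_cons, pvNotAmp]
        have h2 : List.dropWhile pvNotAmp ('&' :: rest) = '&' :: rest := by
          simp [List.dropWhile_cons, pvNotAmp]
        rw [hstep, ih rest [] (cur.reverse :: acc) (by simp at h; omega), h1, h2]
        rw [dif_neg (List.cons_ne_nil '&' rest)]
        simp only [List.tail_cons]
        conv_rhs => rw [pvSpl]
        simp only [List.reverse_cons, List.reverse_nil, List.nil_append, List.append_nil,
          List.append_assoc, List.singleton_append, List.cons_append]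
      · have hc2 : ¬ ('&' = c) := fun e => hc e.symm
        have hbc : ('&' == c) = false := by
          rw [beq_eq_false_iff_ne]
          exact fun e => hc e.symm
        have hpre : "&".toList.isPrefixOf (c :: rest) = false := by
          have e : "&".toList.isPrefixOf (c :: rest) = (('&' == c) && true) := rfl
          rw [e, hbc]
          rfl
        have hstep : PySem.Chars.splitOn.go "&".toList (n + 1) (c :: rest) cur acc =
            PySem.Chars.splitOn.go "&".toList n rest (c :: cur) acc := by
          simp [PySem.Chars.splitOn.go, hpre, hc2]
        have hpa : pvNotAmp c = true := by simp [pvNotAmp, hc]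
        have h1 : List.takeWhile pvNotAmp (c :: rest) = c :: List.takeWhile pvNotAmp rest := by
          simp [List.takeWhile_cons, hpa]
        have h2 : List.dropWhile pvNotAmp (c :: rest) = List.dropWhile pvNotAmp rest := by
          simp [List.dropWhile_cons, hpa]
        rw [hstep, ih rest (c :: cur) acc (by simp at h; omega), h1, h2]
        simp only [List.reverse_cons, List.append_assoc, List.singleton_append,
          List.cons_append, List.nil_append]

lemma pvSplitOn_eq (cs : List Char) :
    PySem.Chars.splitOn cs "&".toList = pvSpl cs := by
  unfold PySem.Chars.splitOn
  rw [pvGo_eq (cs.length + 1) cs [] [] (by omega)]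
  conv_rhs => rw [pvSpl]
  simp only [List.reverse_nil, List.nil_append]

-- the regex boundary test, read through A's partition of the first token
lemma pvMatch_iff (cs : List Char) :
    pvMatchB cs = true ↔
      ((cs.takeWhile pvNotAmp).takeWhile pvNotEqs = "compat".toList ∧
        pvTruthy (((cs.takeWhile pvNotAmp).dropWhile pvNotEqs).drop 1) = true) := by
  by_cases hp : "compat=".toList <+: cs
  · obtain ⟨r, rfl⟩ := hp
    have t1 : ("compat=".toList ++ r).takeWhile pvNotAmp =
        'c' :: 'o' :: 'm' :: 'p' :: 'a' :: 't' :: '=' :: (r.takeWhile pvNotAmp) := rfl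
    have t2 : ('c' :: 'o' :: 'm' :: 'p' :: 'a' :: 't' :: '=' ::
        (r.takeWhile pvNotAmp)).takeWhile pvNotEqs = "compat".toList := rfl
    have t3 : ('c' :: 'o' :: 'm' :: 'p' :: 'a' :: 't' :: '=' ::
        (r.takeWhile pvNotAmp)).dropWhile pvNotEqs = '=' :: (r.takeWhile pvNotAmp) := rfl
    have t4 : ("compat=".toList ++ r).drop 7 = r := rfl
    have t5 : "compat=".toList.isPrefixOf ("compat=".toList ++ r) = true := rfl
    have t6 : ('=' :: (r.takeWhile pvNotAmp)).drop 1 = r.takeWhile pvNotAmp := rfl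
    rw [pvMatchB, t5, t4, t1, t2, t3, t6]
    simp
  · have hm : pvMatchB cs = false := by
      rw [pvMatchB]
      have hpre : "compat=".toList.isPrefixOf cs = false := by
        rw [← Bool.not_eq_true, List.isPrefixOf_iff_prefix]
        exact hp
      rw [hpre]
      simp
    rw [hm]
    simp only [Bool.false_eq_true, false_iff, not_and]
    intro hk hv
    rcases hd : (cs.takeWhile pvNotAmp).dropWhile pvNotEqs with _ | ⟨d, r'⟩
    · rw [hd] at hv
      exact absurd hv (by decide)
    · have hdne : (cs.takeWhile pvNotAmp).dropWhile pvNotEqs ≠ [] := by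
        rw [hd]; simp
      have hhead := List.head_dropWhile_not pvNotEqs hdne
      have hdval : ((cs.takeWhile pvNotAmp).dropWhile pvNotEqs).head hdne = d := by
        simp [hd]
      rw [hdval] at hhead
      have hdeq : d = '=' := by simpa [pvNotEqs] using hhead
      subst hdeq
      apply hp
      have hsplit := List.takeWhile_append_dropWhile (p := pvNotEqs) (l := cs.takeWhile pvNotAmp)
      rw [hk, hd] at hsplit
      have htok : "compat=".toList <+: cs.takeWhile pvNotAmp := ⟨r', by rw [← hsplit]; rfl⟩
      exact htok.trans (List.takeWhile_prefix _)

-- a non-matching boundary token is skipped by A's loop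
lemma pvLoopA_skip (cs : List Char) (toks : List (List Char)) (hm : pvMatchB cs = false) :
    pvLoopA (cs.takeWhile pvNotAmp :: toks) = pvLoopA toks := by
  have hcl : "compat".toList = ['c', 'o', 'm', 'p', 'a', 't'] := rfl
  by_cases hk : (cs.takeWhile pvNotAmp).takeWhile pvNotEqs = "compat".toList
  · cases hvb : pvTruthy (((cs.takeWhile pvNotAmp).dropWhile pvNotEqs).drop 1) with
    | true => exact absurd ((pvMatch_iff cs).mpr ⟨hk, hvb⟩) (by simp [hm])
    | false =>
      have hk' := hk
      rw [hcl] at hk'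
      have hvb' := hvb
      simp only [List.drop_one] at hvb'
      simp [pvLoopA, hk, hk', hvb, hvb']
  · have hk' := hk
    rw [hcl] at hk'
    simp [pvLoopA, hk, hk']

-- the scan visits exactly the tokens of the splitter
lemma pvScan_eq (cs : List Char) : pvLoopA (pvSpl cs) = pvScanB cs := by
  induction hn : cs.length using Nat.strong_induction_on generalizing cs with
  | _ n ih =>
    subst hn
    rw [pvSpl, pvScanB]
    by_cases hm : pvMatchB cs = true
    · obtain ⟨hk, hv⟩ := (pvMatch_iff cs).mp hm
      have hk' := hk
      rw [show "compat".toList = ['c', 'o', 'm', 'p', 'a', 't'] from rfl] at hk'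
      have hv' := hv
      simp only [List.drop_one] at hv'
      simp [pvLoopA, hk, hk', hv, hv', hm]
    · have hm' : pvMatchB cs = false := by simpa using hm
      rw [if_neg hm, pvLoopA_skip cs _ hm']
      by_cases hd : cs.dropWhile pvNotAmp = []
      · rw [dif_pos hd, dif_pos hd]
        simp [pvLoopA]
      · rw [dif_neg hd, dif_neg hd]
        have hlt : ((cs.dropWhile pvNotAmp).tail).length < cs.length := by
          have h1 : (cs.dropWhile pvNotAmp).length ≤ cs.length :=
            (List.dropWhile_suffix _).length_le
          have h2 : 0 < (cs.dropWhile pvNotAmp).length := List.length_pos_of_ne_nil hd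
          rw [List.length_tail]
          omega
        exact ih _ hlt _ rfl

-- ===== VERDICT (by name: the statement is the Claim_ definition above) =====
theorem compatibility_mode_requested_from_query_py_spec : Claim_equal_compatibility_mode_requested_from_query_py := by
  intro query _
  unfold Spec_compatibility_mode_requested_from_query_py
  unfold compatibility_mode_requested_from_query_py compatibility_mode_requested_from_query_py_alt
  rw [pvSplitOn_eq, pvScan_eq]
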